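-- pv_equiv track=rewrite | github.com/salma-shaik/challenge_problems | leet_code/movies_on_flight.py | find_longest_movie
-- ===== SOURCE A (Python) =====
-- def find_longest_movie(m_dur, f_dur):
--     max_dur = f_dur - 30
--
--     # variable to always hold the max value
--     movie_dur = 0
--
--     # variable to hold the max duration movie pairs
--     movies_pair = []
--
--     for i in range(len(m_dur) - 1):
--         j = i+1
--
--         while j < len(m_dur):
--
--             # get the duration of current pair of movies
--             current_movies_dur = m_dur[i]+m_dur[j]
--
--             # checking if total duration of the two movies is less than or equal to (d - 30min)
--             if current_movies_dur <= max_dur: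
--                 # if movie dur > current max movie dur, assign the current values to placeholders
--                 if current_movies_dur > movie_dur:
--                     movie_dur = current_movies_dur
--                     movies_pair = [m_dur[i], m_dur[j]]
--                 # if current movie dur is equal to the existing movie_dur value
--                 elif current_movies_dur == movie_dur:
--                     # then check which one has the longest duration movie.
--                     # If current movies pair has longest duration, assign it to movies_pair placeholder
--                     if max(movies_pair) < max([m_dur[i],m_dur[j]]):
--                         movies_pair = [m_dur[i],m_dur[j]]
--
--             j += 1
--
--
--     return movies_pair
-- ===== SOURCE B (Python) =====
-- def find_longest_movie(m_dur, f_dur):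
--     cap = f_dur - 30
--     n = len(m_dur)
--     s = sorted(m_dur)
--     best_s = 0
--     best_m = 0
--     l, r = 0, n - 1
--     while l < r:
--         t = s[l] + s[r]
--         if t <= cap:
--             if t > 0 and (t > best_s or (t == best_s and s[r] > best_m)):
--                 best_s, best_m = t, s[r]
--             l += 1
--         else:
--             r -= 1
--     if best_s == 0:
--         return []
--     a, b = best_s - best_m, best_m
--     for x in m_dur:
--         if x == a:
--             return [a, b]
--         if x == b:
--             return [b, a]
--     return []
-- ===== Notes on version B (the rewrite author's own statement) =====
-- stated objective: faster
-- what changed: Replaces A's O(n^2) scan over all index pairs with sort + two-pointer sweep that finds the best (total, larger-movie) key, then a single linear scan of the original list rebuilds the winning pair in A's output order.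
import Mathlib
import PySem

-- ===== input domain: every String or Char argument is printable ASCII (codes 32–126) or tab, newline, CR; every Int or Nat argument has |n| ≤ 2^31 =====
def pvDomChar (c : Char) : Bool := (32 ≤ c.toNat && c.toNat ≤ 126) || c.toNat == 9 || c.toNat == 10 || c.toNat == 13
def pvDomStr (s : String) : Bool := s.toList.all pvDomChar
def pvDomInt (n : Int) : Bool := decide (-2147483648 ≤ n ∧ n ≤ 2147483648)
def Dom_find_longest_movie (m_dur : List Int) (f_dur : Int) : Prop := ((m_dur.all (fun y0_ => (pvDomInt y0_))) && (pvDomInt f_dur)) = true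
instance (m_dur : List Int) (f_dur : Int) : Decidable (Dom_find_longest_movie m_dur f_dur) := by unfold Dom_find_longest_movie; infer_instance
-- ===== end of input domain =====

-- B replaces A's O(n²) scan over all index pairs by sort + two-pointer that finds the best
-- (sum, larger-element) key, followed by one linear scan of the original list to rebuild the
-- pair in A's output order.  Equivalence is on return values; neither version mutates its input.

-- ===== PORT A =====
-- inner 'while j < len(m_dur)' loop of A; state = (movie_dur, movies_pair);
-- fuel = (len - j).toNat makes the recursion structural and never runs out while j < len
def pvAInnerGo (m : List Int) (cap : Int) (i : Int) : Nat → Int → Int × List Int → Int × List Int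
  | 0, _, st => st
  | fuel + 1, j, st =>
    if j < (m.length : Int) then
      let cur := PySem.List.pyGetD m i 0 + PySem.List.pyGetD m j 0
      let st' :=
        if cur ≤ cap then
          if st.1 < cur then (cur, [PySem.List.pyGetD m i 0, PySem.List.pyGetD m j 0])
          else if cur = st.1 then
            match PySem.List.max? st.2 (fun y => y), PySem.List.max? [PySem.List.pyGetD m i 0, PySem.List.pyGetD m j 0] (fun y => y) with
            | some a, some c =>
                if a < c then (st.1, [PySem.List.pyGetD m i 0, PySem.List.pyGetD m j 0]) else st
            | _, _ => st  -- Python raises ValueError here (max of empty movies_pair); outside Pre_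
          else st
        else st
      pvAInnerGo m cap i fuel (j + 1) st'
    else st

def find_longest_movie (m_dur : List Int) (f_dur : Int) : List Int :=
  let max_dur := f_dur - 30
  let res := (PySem.List.pyRange 0 ((m_dur.length : Int) - 1) 1).foldl
      (fun st i => pvAInnerGo m_dur max_dur i ((m_dur.length : Int) - (i + 1)).toNat (i + 1) st) (0, [])
  res.2

-- ===== PORT B =====
-- two-pointer sweep over the sorted list; state = (best_s, best_m);
-- fuel = (r - l).toNat makes the recursion structural and never runs out while l < r
def pvTPGo (s : List Int) (cap : Int) : Nat → Int → Int → Int → Int → Int × Int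
  | 0, _, _, bs, bm => (bs, bm)
  | fuel + 1, l, r, bs, bm =>
    if l < r then
      let t := PySem.List.pyGetD s l 0 + PySem.List.pyGetD s r 0
      if t ≤ cap then
        if 0 < t ∧ (bs < t ∨ (t = bs ∧ bm < PySem.List.pyGetD s r 0)) then
          pvTPGo s cap fuel (l + 1) r t (PySem.List.pyGetD s r 0)
        else pvTPGo s cap fuel (l + 1) r bs bm
      else pvTPGo s cap fuel l (r - 1) bs bm
    else (bs, bm)

-- 'for x in m_dur: if x == a: return [a, b]  / if x == b: return [b, a]'
def pvScan : List Int → Int → Int → List Int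
  | [], _, _ => []
  | x :: rest, a, b => if x = a then [a, b] else if x = b then [b, a] else pvScan rest a b

def find_longest_movie_alt (m_dur : List Int) (f_dur : Int) : List Int :=
  let cap := f_dur - 30
  let s := PySem.List.sorted m_dur (fun y => y) false
  let bb := pvTPGo s cap ((m_dur.length : Int) - 1 - 0).toNat 0 ((m_dur.length : Int) - 1) 0 0
  if bb.1 = 0 then []
  else pvScan m_dur (bb.1 - bb.2) bb.2

-- ===== PRECONDITION & SPEC =====
-- Pre_ excludes exactly the inputs where Python A raises ValueError (max([]) on an empty
-- movies_pair): those where some index pair sums to 0 with 0 ≤ f_dur - 30 and no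
-- lexicographically earlier index pair has a positive sum ≤ f_dur - 30.
def Pre_find_longest_movie (m_dur : List Int) (f_dur : Int) : Prop :=
  ¬ (0 ≤ f_dur - 30 ∧ ∃ i < m_dur.length, ∃ j < m_dur.length, i < j ∧
      m_dur.getD i 0 + m_dur.getD j 0 = 0 ∧
      ∀ p < m_dur.length, ∀ q < m_dur.length,
        (p < q ∧ (p < i ∨ (p = i ∧ q < j))) →
        ¬ (0 < m_dur.getD p 0 + m_dur.getD q 0 ∧ m_dur.getD p 0 + m_dur.getD q 0 ≤ f_dur - 30))
instance (m_dur : List Int) (f_dur : Int) : Decidable (Pre_find_longest_movie m_dur f_dur) := by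
  unfold Pre_find_longest_movie; infer_instance

def pvWitness_find_longest_movie : List Int × Int := ([10, 45, 65], 100)

def Spec_find_longest_movie (m_dur : List Int) (f_dur : Int) (out : List Int) : Prop := out = find_longest_movie_alt m_dur f_dur
instance (m_dur : List Int) (f_dur : Int) (out : List Int) : Decidable (Spec_find_longest_movie m_dur f_dur out) := by unfold Spec_find_longest_movie; infer_instance

-- ===== CLAIM (what is proved, stated in full; the proofs are below) =====
def Claim_equal_find_longest_movie : Prop := ∀ (m_dur : List Int) (f_dur : Int), Dom_find_longest_movie m_dur f_dur → Pre_find_longest_movie m_dur f_dur → Spec_find_longest_movie m_dur f_dur (find_longest_movie m_dur f_dur)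


-- ===== LEMMAS AND PROOFS =====

-- abstract key of an (ordered) value pair: (total duration, longer movie)
def pvKey (p : Int × Int) : Int × Int := (p.1 + p.2, max p.1 p.2)
def pvCand (cap : Int) (k : Int × Int) : Bool := decide (0 < k.1) && decide (k.1 ≤ cap)
def pvLt (a b : Int × Int) : Bool := decide (a.1 < b.1) || (decide (a.1 = b.1) && decide (a.2 < b.2))
def pvJoin (a b : Int × Int) : Int × Int := if pvLt a b then b else a
def pvUpd (cap : Int) (o : Option (Int × Int)) (k : Int × Int) : Option (Int × Int) :=
  if pvCand cap k then some (match o with | none => k | some a => pvJoin a k) else o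
def pvPairs : List Int → List (Int × Int)
  | [] => []
  | x :: xs => xs.map (fun y => (x, y)) ++ pvPairs xs
def pvKeys (l : List Int) : List (Int × Int) := (pvPairs l).map pvKey
-- A's update on abstract state (the stored pair, or none)
def pvStepA (cap : Int) (st : Option (Int × Int)) (p : Int × Int) : Option (Int × Int) :=
  if p.1 + p.2 ≤ cap then
    match st with
    | none => if 0 < p.1 + p.2 then some p else none
    | some q => if q.1 + q.2 < p.1 + p.2 then some p
                else if p.1 + p.2 = q.1 + q.2 ∧ max q.1 q.2 < max p.1 p.2 then some p else some q
  else st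
def pvAbs : Option (Int × Int) → Int × List Int
  | none => (0, [])
  | some p => (p.1 + p.2, [p.1, p.2])
def pvB : Option (Int × Int) → Int × Int
  | none => (0, 0)
  | some k => k

theorem pvKey_swap (x y : Int) : pvKey (y, x) = pvKey (x, y) := by
  simp only [pvKey, Prod.mk.injEq]
  constructor
  · omega
  · omega

theorem pvJoin_comm (a b : Int × Int) : pvJoin a b = pvJoin b a := by
  rcases a with ⟨a1, a2⟩; rcases b with ⟨b1, b2⟩
  simp only [pvJoin, pvLt, Bool.or_eq_true, Bool.and_eq_true, decide_eq_true_eq]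
  split_ifs <;> first | rfl | (simp_all [Prod.mk.injEq]; omega)

theorem pvJoin_eq_right (a k : Int × Int) (h : pvLt k a = false) : pvJoin a k = k := by
  rcases a with ⟨a1, a2⟩; rcases k with ⟨k1, k2⟩
  simp only [pvLt, Bool.or_eq_false_iff, Bool.and_eq_false_iff, decide_eq_false_iff_not] at h
  simp only [pvJoin, pvLt, Bool.or_eq_true, Bool.and_eq_true, decide_eq_true_eq]
  split_ifs <;> first | rfl | (simp_all [Prod.mk.injEq]; omega)

theorem pvJoin_absorb (x a k : Int × Int) (h : pvLt k a = false) :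
    pvJoin (pvJoin x a) k = pvJoin x k := by
  rcases x with ⟨x1, x2⟩; rcases a with ⟨a1, a2⟩; rcases k with ⟨k1, k2⟩
  simp only [pvLt, Bool.or_eq_false_iff, Bool.and_eq_false_iff, decide_eq_false_iff_not] at h
  simp only [pvJoin, pvLt, Bool.or_eq_true, Bool.and_eq_true, decide_eq_true_eq]
  split_ifs <;> first | rfl | (simp_all [Prod.mk.injEq]; omega)

theorem pvJoin_assoc2 (x a b : Int × Int) : pvJoin (pvJoin x a) b = pvJoin (pvJoin x b) a := by
  rcases x with ⟨x1, x2⟩; rcases a with ⟨a1, a2⟩; rcases b with ⟨b1, b2⟩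
  simp only [pvJoin, pvLt, Bool.or_eq_true, Bool.and_eq_true, decide_eq_true_eq]
  split_ifs <;> first | rfl | (simp_all [Prod.mk.injEq]; omega)

theorem pvUpd_of_noncand (cap : Int) (o : Option (Int × Int)) (k : Int × Int)
    (h : pvCand cap k = false) : pvUpd cap o k = o := by
  unfold pvUpd; rw [if_neg (by simp [h])]

theorem pvUpd_none_cand (cap : Int) (k : Int × Int) (h : pvCand cap k = true) :
    pvUpd cap none k = some k := by
  unfold pvUpd; rw [if_pos (by simp [h])]

theorem pvUpd_some_cand (cap : Int) (a k : Int × Int) (h : pvCand cap k = true) :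
    pvUpd cap (some a) k = some (pvJoin a k) := by
  unfold pvUpd; rw [if_pos (by simp [h])]

theorem pvUpd_comm (cap : Int) (o : Option (Int × Int)) (a b : Int × Int) :
    pvUpd cap (pvUpd cap o a) b = pvUpd cap (pvUpd cap o b) a := by
  by_cases ha : pvCand cap a = true <;> by_cases hb : pvCand cap b = true
  · rcases o with _ | x
    · rw [pvUpd_none_cand _ _ ha, pvUpd_none_cand _ _ hb,
        pvUpd_some_cand _ _ _ hb, pvUpd_some_cand _ _ _ ha, pvJoin_comm]
    · rw [pvUpd_some_cand _ _ _ ha, pvUpd_some_cand _ _ _ hb,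
        pvUpd_some_cand _ _ _ hb, pvUpd_some_cand _ _ _ ha, pvJoin_assoc2]
  · rw [pvUpd_of_noncand _ _ b (by simpa using hb), pvUpd_of_noncand _ _ b (by simpa using hb)]
  · rw [pvUpd_of_noncand _ _ a (by simpa using ha), pvUpd_of_noncand _ _ a (by simpa using ha)]
  · rw [pvUpd_of_noncand _ _ b (by simpa using hb), pvUpd_of_noncand _ _ a (by simpa using ha),
      pvUpd_of_noncand _ _ a (by simpa using ha), pvUpd_of_noncand _ _ b (by simpa using hb)]

theorem pvUpd_absorb (cap : Int) (o : Option (Int × Int)) (a k : Int × Int)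
    (hck : pvCand cap k = true) (h : pvLt k a = false) :
    pvUpd cap (pvUpd cap o a) k = pvUpd cap o k := by
  by_cases ha : pvCand cap a = true
  · rcases o with _ | x
    · rw [pvUpd_none_cand _ _ ha, pvUpd_some_cand _ _ _ hck, pvUpd_none_cand _ _ hck,
        pvJoin_eq_right _ _ h]
    · rw [pvUpd_some_cand _ _ _ ha, pvUpd_some_cand _ _ _ hck, pvUpd_some_cand _ _ _ hck,
        pvJoin_absorb _ _ _ h]
  · rw [pvUpd_of_noncand _ _ a (by simpa using ha)]

theorem pvFold_noncand (cap : Int) (ks : List (Int × Int)) (o : Option (Int × Int))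
    (h : ∀ k ∈ ks, pvCand cap k = false) : ks.foldl (pvUpd cap) o = o := by
  induction ks generalizing o with
  | nil => rfl
  | cons k ks ih =>
    simp only [List.foldl_cons]
    rw [pvUpd_of_noncand _ _ _ (h k (by simp)), ih _ (fun x hx => h x (by simp [hx]))]

theorem pvFold_absorb (cap : Int) (ks : List (Int × Int)) (o : Option (Int × Int)) (k : Int × Int)
    (hck : pvCand cap k = true) (h : ∀ a ∈ ks, pvLt k a = false) :
    (ks ++ [k]).foldl (pvUpd cap) o = pvUpd cap o k := by
  induction ks generalizing o with
  | nil => rfl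
  | cons a ks ih =>
    simp only [List.cons_append, List.foldl_cons]
    rw [ih _ (fun x hx => h x (by simp [hx])), pvUpd_absorb _ _ _ _ hck (h a (by simp))]

theorem pvLt_irrefl (a : Int × Int) : pvLt a a = false := by
  simp [pvLt]

theorem pvLt_false_trans (a b c : Int × Int) (h1 : pvLt b a = false) (h2 : pvLt c b = false) :
    pvLt c a = false := by
  unfold pvLt at h1 h2 ⊢
  simp only [Bool.or_eq_false_iff, Bool.and_eq_false_iff, decide_eq_false_iff_not] at *
  omega

theorem pvJoin_ge_left (a b : Int × Int) : pvLt (pvJoin a b) a = false := by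
  rcases a with ⟨a1, a2⟩; rcases b with ⟨b1, b2⟩
  simp only [pvJoin, pvLt, Bool.or_eq_true, Bool.and_eq_true, decide_eq_true_eq]
  split_ifs <;>
    simp only [pvLt, Bool.or_eq_false_iff, Bool.and_eq_false_iff, decide_eq_false_iff_not] <;>
    omega

theorem pvJoin_ge_right (a b : Int × Int) : pvLt (pvJoin a b) b = false := by
  rw [pvJoin_comm]; exact pvJoin_ge_left b a

theorem pvJoin_eq_or (a b : Int × Int) : pvJoin a b = a ∨ pvJoin a b = b := by
  unfold pvJoin; split_ifs <;> simp

theorem pvFold_mono (cap : Int) (ks : List (Int × Int)) (k0 : Int × Int) :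
    ∃ k, ks.foldl (pvUpd cap) (some k0) = some k ∧ pvLt k k0 = false := by
  induction ks generalizing k0 with
  | nil => exact ⟨k0, rfl, pvLt_irrefl k0⟩
  | cons a ks ih =>
    simp only [List.foldl_cons]
    by_cases ha : pvCand cap a = true
    · rw [pvUpd_some_cand _ _ _ ha]
      obtain ⟨k, hk, hlt⟩ := ih (pvJoin k0 a)
      exact ⟨k, hk, pvLt_false_trans _ _ _ (pvJoin_ge_left k0 a) hlt⟩
    · rw [pvUpd_of_noncand _ _ a (by simpa using ha)]
      exact ih k0

theorem pvFold_ub (cap : Int) (ks : List (Int × Int)) (o : Option (Int × Int)) (q : Int × Int)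
    (hq : q ∈ ks) (hc : pvCand cap q = true) :
    ∃ k, ks.foldl (pvUpd cap) o = some k ∧ pvLt k q = false := by
  induction ks generalizing o with
  | nil => cases hq
  | cons a ks ih =>
    simp only [List.foldl_cons]
    rcases List.mem_cons.mp hq with rfl | hq'
    · rcases o with _ | x
      · rw [pvUpd_none_cand _ _ hc]
        exact pvFold_mono cap ks q
      · rw [pvUpd_some_cand _ _ _ hc]
        obtain ⟨k, hk, hlt⟩ := pvFold_mono cap ks (pvJoin x q)
        exact ⟨k, hk, pvLt_false_trans _ _ _ (pvJoin_ge_right x q) hlt⟩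
    · exact ih _ hq'

theorem pvFold_attain (cap : Int) (ks : List (Int × Int)) (o : Option (Int × Int)) (k : Int × Int)
    (h : ks.foldl (pvUpd cap) o = some k) : o = some k ∨ (k ∈ ks ∧ pvCand cap k = true) := by
  induction ks generalizing o with
  | nil => exact Or.inl h
  | cons a ks ih =>
    simp only [List.foldl_cons] at h
    rcases ih _ h with h' | h'
    · by_cases ha : pvCand cap a = true
      · rcases o with _ | x
        · rw [pvUpd_none_cand _ _ ha] at h'
          refine Or.inr ⟨?_, ?_⟩
          · simp [← Option.some_inj.mp h']
          · rw [← Option.some_inj.mp h']; exact ha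
        · rw [pvUpd_some_cand _ _ _ ha] at h'
          rcases pvJoin_eq_or x a with he | he
          · exact Or.inl (by rw [← h', he])
          · refine Or.inr ⟨?_, ?_⟩
            · have : a = k := by rw [← he]; exact Option.some_inj.mp h'
              simp [this]
            · have : a = k := by rw [← he]; exact Option.some_inj.mp h'
              rw [← this]; exact ha
      · rw [pvUpd_of_noncand _ _ a (by simpa using ha)] at h'
        exact Or.inl h'
    · exact Or.inr ⟨List.mem_cons_of_mem _ h'.1, h'.2⟩

-- ---- A's loops compute the foldl of pvStepA over all index pairs in lexicographic order ----

theorem pvAInnerGo_eq (m : List Int) (cap : Int) (i : Nat) (hi : i < m.length) :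
    ∀ (fuel : Nat) (j : Nat) (o : Option (Int × Int)), j + fuel = m.length →
    pvAInnerGo m cap (i : Int) fuel (j : Int) (pvAbs o) =
      pvAbs (((m.drop j).map (fun y => (m[i], y))).foldl (pvStepA cap) o) := by
  intro fuel
  induction fuel with
  | zero =>
    intro j o hj
    have : m.drop j = [] := List.drop_eq_nil_of_le (by omega)
    simp [pvAInnerGo, this]
  | succ fuel ih =>
    intro j o hj
    have hjlt : j < m.length := by omega
    have hgi : PySem.List.pyGetD m (i : Int) 0 = m[i] := by
      rw [PySem.List.pyGetD_natCast, List.getD_eq_getElem _ _ hi]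
    have hgj : PySem.List.pyGetD m (j : Int) 0 = m[j] := by
      rw [PySem.List.pyGetD_natCast, List.getD_eq_getElem _ _ hjlt]
    rw [List.drop_eq_getElem_cons hjlt]
    simp only [List.map_cons, List.foldl_cons]
    show pvAInnerGo m cap (i : Int) (fuel + 1) (j : Int) (pvAbs o) = _
    unfold pvAInnerGo
    rw [if_pos (by exact_mod_cast hjlt)]
    have hstep :
        (if PySem.List.pyGetD m (i : Int) 0 + PySem.List.pyGetD m (j : Int) 0 ≤ cap then
           if (pvAbs o).1 < PySem.List.pyGetD m (i : Int) 0 + PySem.List.pyGetD m (j : Int) 0 then (PySem.List.pyGetD m (i : Int) 0 + PySem.List.pyGetD m (j : Int) 0, [PySem.List.pyGetD m (i : Int) 0, PySem.List.pyGetD m (j : Int) 0])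
           else if PySem.List.pyGetD m (i : Int) 0 + PySem.List.pyGetD m (j : Int) 0 = (pvAbs o).1 then
             match PySem.List.max? (pvAbs o).2 (fun y => y), PySem.List.max? [PySem.List.pyGetD m (i : Int) 0, PySem.List.pyGetD m (j : Int) 0] (fun y => y) with
             | some a, some c =>
                 if a < c then ((pvAbs o).1, [PySem.List.pyGetD m (i : Int) 0, PySem.List.pyGetD m (j : Int) 0]) else pvAbs o
             | _, _ => pvAbs o
           else pvAbs o
         else pvAbs o) = pvAbs (pvStepA cap o (m[i], m[j])) := by
      rw [hgi, hgj]
      rcases o with _ | q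
      · simp only [pvAbs, pvStepA]
        split_ifs with h1 h2 h3 <;> simp_all [PySem.List.max?]
      · simp only [pvAbs, pvStepA, PySem.List.max?_id_cons, List.foldl_cons, List.foldl_nil]
        split_ifs with h1 h2 h3 h4 h5 <;> simp_all
    have hcast : ((j : Int) + 1) = ((j + 1 : Nat) : Int) := by push_cast; ring
    simp only [hstep, hcast]
    rw [ih (j + 1) _ (by omega)]

theorem pvAOuter_eq (m : List Int) (cap : Int) :
    ∀ (fuel t : Nat) (o : Option (Int × Int)), t + fuel + 1 = m.length →
    (PySem.List.pyRange (t : Int) ((m.length : Int) - 1) 1).foldl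
      (fun st i => pvAInnerGo m cap i ((m.length : Int) - (i + 1)).toNat (i + 1) st) (pvAbs o)
    = pvAbs ((pvPairs (m.drop t)).foldl (pvStepA cap) o) := by
  intro fuel
  induction fuel with
  | zero =>
    intro t o ht
    rw [PySem.List.pyRange_one_eq_nil (by omega)]
    have hlen : (m.drop t).length ≤ 1 := by simp; omega
    have : pvPairs (m.drop t) = [] := by
      rcases hd : m.drop t with _ | ⟨x, rest⟩
      · rfl
      · rw [hd] at hlen
        have : rest = [] := by
          rcases rest with _ | _
          · rfl
          · simp at hlen
        simp [this, pvPairs]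
    simp [this]
  | succ fuel ih =>
    intro t o ht
    have htlt : t < m.length := by omega
    rw [PySem.List.pyRange_one_cons (by omega)]
    simp only [List.foldl_cons]
    have hcast : ((t : Int) + 1) = ((t + 1 : Nat) : Int) := by push_cast; ring
    have hfuel : ((m.length : Int) - ((t + 1 : Nat) : Int)).toNat = m.length - (t + 1) := by omega
    rw [hcast, hfuel]
    have hinner := pvAInnerGo_eq m cap t htlt (m.length - (t + 1)) (t + 1) o (by omega)
    rw [hinner, ih (t + 1) _ (by omega)]
    rw [List.drop_eq_getElem_cons htlt]
    show _ = pvAbs ((pvPairs (m[t] :: m.drop (t + 1))).foldl (pvStepA cap) o)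
    simp only [pvPairs, List.foldl_append]

theorem pvA_eq_fold (m : List Int) (f : Int) :
    find_longest_movie m f = (pvAbs ((pvPairs m).foldl (pvStepA (f - 30)) none)).2 := by
  unfold find_longest_movie
  rcases m with _ | ⟨x, rest⟩
  · simp [PySem.List.pyRange_one_eq_nil, pvPairs, pvAbs]
  · have h := pvAOuter_eq (x :: rest) (f - 30) ((x :: rest).length - 1) 0 none (by simp)
    simp only [Nat.cast_zero] at h
    simp only [pvAbs] at h ⊢
    rw [h]
    simp

-- ---- the pvStepA fold keeps the FIRST pair attaining the best (sum, max) candidate key ----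

theorem pvCand_key_pos (cap : Int) (k : Int × Int) (h : pvCand cap k = true) :
    0 < k.1 ∧ k.1 ≤ cap := by
  simp only [pvCand, Bool.and_eq_true, decide_eq_true_eq] at h; exact h

theorem pvFoldA_char (cap : Int) (L : List (Int × Int)) :
    L.foldl (pvStepA cap) none =
      (match (L.map pvKey).foldl (pvUpd cap) none with
       | none => none
       | some k => L.find? (fun p => pvKey p == k)) := by
  induction L using List.reverseRecOn with
  | nil => rfl
  | append_singleton L p ih =>
    rw [List.foldl_append, List.map_append, List.foldl_append, ih]
    simp only [List.find?_append]
    simp only [List.map_cons, List.map_nil, List.foldl_cons, List.foldl_nil]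
    by_cases hc : pvCand cap (pvKey p) = true
    · rcases hbk : (L.map pvKey).foldl (pvUpd cap) none with _ | k
      · -- no candidate before p; p becomes the state and the first max
        rw [pvUpd_none_cand _ _ hc]
        have hfind : L.find? (fun q => pvKey q == pvKey p) = none := by
          rw [List.find?_eq_none]
          intro x hx hpx
          have hkx : pvKey x = pvKey p := by simpa using hpx
          obtain ⟨k', hk', -⟩ := pvFold_ub cap (L.map pvKey) none (pvKey x)
            (List.mem_map_of_mem hx) (by rw [hkx]; exact hc)
          rw [hbk] at hk'; cases hk'
        simp only [hfind, Option.none_or]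
        have hp := pvCand_key_pos cap (pvKey p) hc
        simp only [pvKey] at hp
        simp only [pvStepA, if_pos hp.2, if_pos hp.1, List.find?_cons, beq_self_eq_true]
      · -- k is the best key among L's candidates; the state is L's first pair with key k
        have hat := pvFold_attain cap (L.map pvKey) none k hbk
        rcases hat with h' | ⟨hkmem, hkc⟩
        · cases h'
        obtain ⟨p1, hp1find⟩ : ∃ p1, L.find? (fun q => pvKey q == k) = some p1 := by
          obtain ⟨q, hq, hkq⟩ := List.mem_map.mp hkmem
          have : (L.find? (fun q => pvKey q == k)).isSome := by
            rw [List.find?_isSome]; exact ⟨q, hq, by simp [hkq]⟩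
          exact Option.isSome_iff_exists.mp this
        have hkey1 : pvKey p1 = k := by simpa using List.find?_some hp1find
        have hkc' := pvCand_key_pos cap k hkc
        dsimp only
        rw [pvUpd_some_cand _ _ _ hc, hp1find]
        by_cases hlt : pvLt k (pvKey p) = true
        · -- p strictly improves: new best key is pvKey p, the state becomes p
          have hj : pvJoin k (pvKey p) = pvKey p := by unfold pvJoin; rw [if_pos hlt]
          rw [hj]
          have hfind : L.find? (fun q => pvKey q == pvKey p) = none := by
            rw [List.find?_eq_none]
            intro x hx hpx
            have hkx : pvKey x = pvKey p := by simpa using hpx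
            obtain ⟨k', hk', hnl⟩ := pvFold_ub cap (L.map pvKey) none (pvKey x)
              (List.mem_map_of_mem hx) (by rw [hkx]; exact hc)
            rw [hbk] at hk'
            have : k' = k := (Option.some_inj.mp hk').symm
            rw [this, hkx] at hnl
            simp [hlt] at hnl
          simp only [hfind, Option.none_or, List.find?_cons, beq_self_eq_true]
          simp only [pvLt, Bool.or_eq_true, Bool.and_eq_true, decide_eq_true_eq] at hlt
          have hcp := pvCand_key_pos cap (pvKey p) hc
          simp only [pvKey] at hlt hcp
          simp only [pvStepA, if_pos hcp.2]
          rcases hlt with hlt | ⟨heq, hlt⟩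
          · rw [if_pos (by rw [← hkey1] at hlt; simpa [pvKey] using hlt)]
          · rw [if_neg (by rw [← hkey1] at heq; simp only [pvKey] at heq; omega),
              if_pos (And.intro (by rw [← hkey1] at heq; simp only [pvKey] at heq; omega)
                (by rw [← hkey1] at hlt; simpa [pvKey] using hlt))]
        · -- p does not improve: key and first pair are unchanged
          have hltb : pvLt k (pvKey p) = false := by rwa [Bool.not_eq_true] at hlt
          have hj : pvJoin k (pvKey p) = k := by unfold pvJoin; rw [hltb]; simp
          rw [hj]
          dsimp only
          rw [hp1find]
          simp only [Option.some_or]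
          have hk1 := hkey1
          simp only [pvKey, Prod.ext_iff] at hk1
          simp only [pvLt, pvKey, Bool.or_eq_false_iff, Bool.and_eq_false_iff,
            decide_eq_false_iff_not] at hltb
          have hcp := pvCand_key_pos cap (pvKey p) hc
          simp only [pvKey] at hcp
          simp only [pvStepA, if_pos hcp.2]
          rw [if_neg (by omega), if_neg ?_]
          rintro ⟨he, hm⟩
          rcases hltb.2 with hne | hnl
          · omega
          · exact hnl (hk1.2 ▸ hm)
    · -- p is not a candidate: nothing changes
      have hcf : pvCand cap (pvKey p) = false := by rwa [Bool.not_eq_true] at hc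
      rw [pvUpd_of_noncand _ _ _ hcf]
      have hnc : ¬ (0 < p.1 + p.2 ∧ p.1 + p.2 ≤ cap) := by
        simp only [pvCand, pvKey, Bool.and_eq_false_iff, decide_eq_false_iff_not] at hcf
        omega
      rcases hbk : (L.map pvKey).foldl (pvUpd cap) none with _ | k
      · dsimp only
        simp only [pvStepA]
        split_ifs with h1 h2
        · exact absurd ⟨h2, h1⟩ hnc
        · rfl
        · rfl
      · have hat := pvFold_attain cap (L.map pvKey) none k hbk
        rcases hat with h' | ⟨hkmem, hkc⟩
        · cases h'
        obtain ⟨p1, hp1find⟩ : ∃ p1, L.find? (fun q => pvKey q == k) = some p1 := by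
          obtain ⟨q, hq, hkq⟩ := List.mem_map.mp hkmem
          have : (L.find? (fun q => pvKey q == k)).isSome := by
            rw [List.find?_isSome]; exact ⟨q, hq, by simp [hkq]⟩
          exact Option.isSome_iff_exists.mp this
        have hkey1 : pvKey p1 = k := by simpa using List.find?_some hp1find
        have hkc' := pvCand_key_pos cap k hkc
        dsimp only
        rw [hp1find]
        simp only [Option.some_or]
        have hsum1 : p1.1 + p1.2 = k.1 := by rw [← hkey1]; rfl
        simp only [pvStepA]
        split_ifs with h1 h2 h3
        · exact absurd ⟨by omega, h1⟩ hnc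
        · obtain ⟨he, -⟩ := h3
          exact absurd ⟨by omega, h1⟩ hnc
        · rfl
        · rfl

-- ---- pairs machinery: permutation invariance of the best key ----

theorem pvPairs_mem (l : List Int) (p : Int × Int) (hp : p ∈ pvPairs l) :
    p.1 ∈ l ∧ p.2 ∈ l := by
  induction l with
  | nil => cases hp
  | cons x xs ih =>
    simp only [pvPairs, List.mem_append, List.mem_map] at hp
    rcases hp with ⟨y, hy, rfl⟩ | hp
    · exact ⟨by simp, by simp [hy]⟩
    · exact ⟨List.mem_cons_of_mem _ (ih hp).1, List.mem_cons_of_mem _ (ih hp).2⟩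

theorem pvPairs_short (l : List Int) (h : l.length ≤ 1) : pvPairs l = [] := by
  rcases l with _ | ⟨x, rest⟩
  · rfl
  · rcases rest with _ | _
    · rfl
    · simp at h

theorem pvPairs_append_singleton (l : List Int) (y : Int) :
    (pvPairs (l ++ [y])).Perm (pvPairs l ++ l.map (fun x => (x, y))) := by
  induction l with
  | nil => simp [pvPairs]
  | cons x xs ih =>
    simp only [List.cons_append, pvPairs, List.map_append, List.map_cons, List.map_nil,
      List.append_assoc]
    refine List.Perm.append_left _ ?_
    exact (ih.cons _).trans (List.perm_append_comm_assoc [(x, y)] (pvPairs xs) _)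

theorem pvKeys_perm {l l' : List Int} (h : l.Perm l') : (pvKeys l).Perm (pvKeys l') := by
  induction h with
  | nil => exact List.Perm.refl _
  | cons x h ih =>
    simp only [pvKeys, pvPairs, List.map_append, List.map_map]
    exact ((h.map _).append ih)
  | swap x y l =>
    simp only [pvKeys, pvPairs, List.map_append, List.map_map, List.map_cons]
    rw [pvKey_swap]
    exact (List.perm_append_comm_assoc _ _ _).cons _
  | trans h1 h2 ih1 ih2 => exact ih1.trans ih2

theorem pvBk_perm (cap : Int) {l l' : List Int} (h : l.Perm l') :
    (pvKeys l).foldl (pvUpd cap) none = (pvKeys l').foldl (pvUpd cap) none :=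
  (pvKeys_perm h).foldl_eq' (fun x _ y _ z => pvUpd_comm cap z x y) none

-- ---- B's two-pointer sweep computes the best candidate key of the sorted list ----

theorem pvWin_getElem (s : List Int) (a b i : Nat) (h : i < ((s.drop a).take b).length) :
    ((s.drop a).take b)[i] = s[a + i]'(by simp at h; omega) := by
  rw [List.getElem_take, List.getElem_drop]

theorem pvWin_short (s : List Int) (a b : Nat) (h : b ≤ 1) :
    pvPairs ((s.drop a).take b) = [] := by
  apply pvPairs_short
  simp only [List.length_take, List.length_drop]
  omega

theorem pvUpd_pos (cap : Int) (o : Option (Int × Int)) (k : Int × Int)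
    (ho : ∀ k', o = some k' → 0 < k'.1) (hk : 0 < k.1) :
    ∀ k', pvUpd cap o k = some k' → 0 < k'.1 := by
  intro k' h
  by_cases hc : pvCand cap k = true
  · rcases o with _ | a
    · rw [pvUpd_none_cand _ _ hc] at h
      rw [← Option.some_inj.mp h]; exact hk
    · rw [pvUpd_some_cand _ _ _ hc] at h
      have := Option.some_inj.mp h
      rcases pvJoin_eq_or a k with he | he <;> rw [← this, he]
      · exact ho a rfl
      · exact hk
  · rw [pvUpd_of_noncand _ _ _ (by simpa using hc)] at h
    exact ho k' h

theorem pvTPGo_eq (s : List Int) (cap : Int) (hs : s.Pairwise (· ≤ ·)) :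
    ∀ (fuel : Nat) (l r : Nat) (o : Option (Int × Int)), r < s.length → r - l ≤ fuel →
    (∀ k', o = some k' → 0 < k'.1) →
    pvTPGo s cap fuel (l : Int) (r : Int) (pvB o).1 (pvB o).2 =
      pvB (((pvPairs ((s.drop l).take (r + 1 - l))).map pvKey).foldl (pvUpd cap) o) := by
  have hget := List.pairwise_iff_getElem.mp hs
  intro fuel
  induction fuel with
  | zero =>
    intro l r o hr hf ho
    rw [pvWin_short s l (r + 1 - l) (by omega)]
    rfl
  | succ fuel ih =>
    intro l r o hr hf ho
    by_cases hlr : l < r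
    case neg =>
      rw [pvWin_short s l (r + 1 - l) (by omega)]
      show pvTPGo s cap (fuel + 1) (l : Int) (r : Int) (pvB o).1 (pvB o).2 = pvB o
      unfold pvTPGo
      rw [if_neg (by exact_mod_cast hlr)]
    case pos =>
      have hllen : l < s.length := by omega
      have hgl : PySem.List.pyGetD s (l : Int) 0 = s[l] := by
        rw [PySem.List.pyGetD_natCast, List.getD_eq_getElem _ _ hllen]
      have hgr : PySem.List.pyGetD s (r : Int) 0 = s[r] := by
        rw [PySem.List.pyGetD_natCast, List.getD_eq_getElem _ _ hr]
      have hxz : s[l] ≤ s[r] := hget l r hllen hr hlr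
      show pvTPGo s cap (fuel + 1) (l : Int) (r : Int) (pvB o).1 (pvB o).2 = _
      unfold pvTPGo
      rw [if_pos (by exact_mod_cast hlr)]
      simp only [hgl, hgr]
      by_cases hcap : s[l] + s[r] ≤ cap
      case pos =>
        rw [if_pos hcap]
        -- window decompositions
        have hW : (s.drop l).take (r + 1 - l) = s[l] :: (s.drop (l + 1)).take (r - l) := by
          rw [List.drop_eq_getElem_cons hllen, show r + 1 - l = (r - l) + 1 by omega,
            List.take_succ_cons]
        have hW' : (s.drop (l + 1)).take (r - l) =
            (s.drop (l + 1)).take (r - l - 1) ++ [s[r]] := by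
          have h2 : (s.drop (l + 1))[r - l - 1]? = some s[r] := by
            rw [List.getElem?_drop, show l + 1 + (r - l - 1) = r by omega]
            exact List.getElem?_eq_getElem hr
          calc (s.drop (l + 1)).take (r - l) = (s.drop (l + 1)).take ((r - l - 1) + 1) := by
                rw [show (r - l - 1) + 1 = r - l by omega]
            _ = (s.drop (l + 1)).take (r - l - 1) ++ ((s.drop (l + 1))[r - l - 1]?).toList :=
                List.take_add_one
            _ = (s.drop (l + 1)).take (r - l - 1) ++ [s[r]] := by rw [h2]; rfl
        -- every pair key (s[l], y) for y in the strict inner window is dominated by (t, s[r])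
        have hdom : ∀ a ∈ ((s.drop (l + 1)).take (r - l - 1)).map (fun y => pvKey (s[l], y)),
            pvLt (s[l] + s[r], s[r]) a = false := by
          intro a ha
          obtain ⟨y, hy, rfl⟩ := List.mem_map.mp ha
          obtain ⟨i, hi, hiy⟩ := List.mem_iff_getElem.mp hy
          rw [pvWin_getElem] at hiy
          have hilen : l + 1 + i < s.length := by simp at hi; omega
          have hir : l + 1 + i < r := by simp at hi; omega
          have hyr : y ≤ s[r] := by rw [← hiy]; exact hget _ r hilen hr hir
          have hly : s[l] ≤ y := by rw [← hiy]; exact hget l _ hllen hilen (by omega)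
          have hmax : pvKey (s[l], y) = (s[l] + y, y) := by
            simp [pvKey, max_eq_right hly]
          rw [hmax]
          simp only [pvLt, Bool.or_eq_false_iff, Bool.and_eq_false_iff,
            decide_eq_false_iff_not]
          omega
        have hkey : pvKey (s[l], s[r]) = (s[l] + s[r], s[r]) := by
          simp [pvKey, max_eq_right hxz]
        -- the fold over the first block is a single pvUpd with key (t, s[r])
        have hpart1 : (((s.drop (l + 1)).take (r - l)).map (fun y => pvKey (s[l], y))).foldl
            (pvUpd cap) o = pvUpd cap o (s[l] + s[r], s[r]) := by
          rw [hW', List.map_append]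
          simp only [List.map_cons, List.map_nil, hkey]
          by_cases hcand : pvCand cap (s[l] + s[r], s[r]) = true
          · exact pvFold_absorb cap _ o _ hcand hdom
          · have hcf : pvCand cap (s[l] + s[r], s[r]) = false := by
              rcases Bool.eq_false_or_eq_true (pvCand cap (s[l] + s[r], s[r])) with h | h
              · exact absurd h hcand
              · exact h
            have ht0 : ¬ 0 < s[l] + s[r] := by
              simp only [pvCand, Bool.and_eq_false_iff, decide_eq_false_iff_not] at hcf
              rcases hcf with h | h
              · exact h
              · exact absurd hcap h
            rw [pvUpd_of_noncand _ _ _ hcf]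
            apply pvFold_noncand
            intro k hk
            rcases List.mem_append.mp hk with hk | hk
            · obtain ⟨y, hy, rfl⟩ := List.mem_map.mp hk
              obtain ⟨i, hi, hiy⟩ := List.mem_iff_getElem.mp hy
              rw [pvWin_getElem] at hiy
              have hilen : l + 1 + i < s.length := by simp at hi; omega
              have hir : l + 1 + i < r := by simp at hi; omega
              have hyr : y ≤ s[r] := by rw [← hiy]; exact hget _ r hilen hr hir
              simp only [pvKey, pvCand, Bool.and_eq_false_iff, decide_eq_false_iff_not]
              left; omega
            · simp only [List.mem_singleton] at hk
              rw [hk]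
              simp only [pvCand, Bool.and_eq_false_iff, decide_eq_false_iff_not]
              left; omega
        -- the port's conditional update matches pvUpd
        have hupd : (if 0 < s[l] + s[r] ∧ ((pvB o).1 < s[l] + s[r] ∨
              (s[l] + s[r] = (pvB o).1 ∧ (pvB o).2 < s[r])) then
              ((s[l] + s[r] : Int), s[r]) else ((pvB o).1, (pvB o).2)) =
            pvB (pvUpd cap o (s[l] + s[r], s[r])) := by
          rcases o with _ | k
          · by_cases ht : 0 < s[l] + s[r]
            · rw [if_pos (by exact ⟨ht, Or.inl ht⟩),
                pvUpd_none_cand _ _ (by simp [pvCand, ht, hcap])]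
              rfl
            · rw [if_neg (by intro hx; exact ht hx.1), pvUpd_of_noncand _ _ _ (by
                simp only [pvCand, Bool.and_eq_false_iff, decide_eq_false_iff_not]
                exact Or.inl ht)]
          · have hpos := ho k rfl
            by_cases ht : 0 < s[l] + s[r]
            · rw [pvUpd_some_cand _ _ _ (by simp [pvCand, ht, hcap])]
              simp only [pvB]
              by_cases hl : pvLt k (s[l] + s[r], s[r]) = true
              · have hl' := hl
                simp only [pvLt, Bool.or_eq_true, Bool.and_eq_true, decide_eq_true_eq] at hl'
                rw [if_pos ⟨ht, by omega⟩]
                unfold pvJoin; rw [if_pos hl]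
              · have hlf : pvLt k (s[l] + s[r], s[r]) = false := by
                  rcases Bool.eq_false_or_eq_true (pvLt k (s[l] + s[r], s[r])) with h | h
                  · exact absurd h hl
                  · exact h
                have hl' := hlf
                simp only [pvLt, Bool.or_eq_false_iff, Bool.and_eq_false_iff,
                  decide_eq_false_iff_not] at hl'
                have hncond : ¬ (0 < s[l] + s[r] ∧ (k.1 < s[l] + s[r] ∨
                    (s[l] + s[r] = k.1 ∧ k.2 < s[r]))) := by
                  rintro ⟨-, hx⟩
                  rcases hl' with ⟨ha, hb | hb⟩ <;> rcases hx with hx | ⟨hx1, hx2⟩ <;> omega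
                rw [if_neg hncond]
                unfold pvJoin; rw [hlf]; simp
            · rw [if_neg (by intro hx; exact ht hx.1), pvUpd_of_noncand _ _ _ (by
                simp only [pvCand, Bool.and_eq_false_iff, decide_eq_false_iff_not]
                exact Or.inl ht)]
        rw [hW]
        simp only [pvPairs, List.map_append, List.map_map]
        rw [List.foldl_append]
        rw [show (List.map (pvKey ∘ fun y => ((s[l] : Int), y)) ((s.drop (l + 1)).take (r - l)))
            = ((s.drop (l + 1)).take (r - l)).map (fun y => pvKey (s[l], y)) from by
          simp only [Function.comp_def]]
        rw [hpart1]
        have hcast : ((l : Int) + 1) = ((l + 1 : Nat) : Int) := by push_cast; ring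
        have ho' : ∀ k', pvUpd cap o (s[l] + s[r], s[r]) = some k' → 0 < k'.1 := by
          intro k' h
          by_cases hc0 : 0 < s[l] + s[r]
          · exact pvUpd_pos cap o _ ho hc0 k' h
          · rw [pvUpd_of_noncand _ _ _ (by
              simp only [pvCand, Bool.and_eq_false_iff, decide_eq_false_iff_not]
              exact Or.inl hc0)] at h
            exact ho k' h
        have hih := ih (l + 1) r (pvUpd cap o (s[l] + s[r], s[r])) hr (by omega) ho'
        rw [show r + 1 - (l + 1) = r - l by omega] at hih
        rw [hcast, ← hih]
        split_ifs with hcond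
        · congr 1
          · rw [← hupd, if_pos hcond]
          · rw [← hupd, if_pos hcond]
        · congr 1
          · rw [← hupd, if_neg hcond]
          · rw [← hupd, if_neg hcond]
      case neg =>
        rw [if_neg hcap]
        have hW2 : (s.drop l).take (r + 1 - l) = (s.drop l).take (r - l) ++ [s[r]] := by
          have h2 : (s.drop l)[r - l]? = some s[r] := by
            rw [List.getElem?_drop, show l + (r - l) = r by omega]
            exact List.getElem?_eq_getElem hr
          calc (s.drop l).take (r + 1 - l) = (s.drop l).take ((r - l) + 1) := by
                rw [show (r - l) + 1 = r + 1 - l by omega]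
            _ = (s.drop l).take (r - l) ++ ((s.drop l)[r - l]?).toList := List.take_add_one
            _ = (s.drop l).take (r - l) ++ [s[r]] := by rw [h2]; rfl
        have hperm : ((pvPairs ((s.drop l).take (r + 1 - l))).map pvKey).Perm
            (((pvPairs ((s.drop l).take (r - l))).map pvKey) ++
              (((s.drop l).take (r - l)).map (fun y => pvKey (y, s[r])))) := by
          rw [hW2]
          have := (pvPairs_append_singleton ((s.drop l).take (r - l)) s[r]).map pvKey
          simpa [List.map_append, List.map_map, Function.comp] using this
        rw [hperm.foldl_eq' (fun x _ y _ z => pvUpd_comm cap z x y) o, List.foldl_append]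
        have hnc : (((s.drop l).take (r - l)).map (fun y => pvKey (y, s[r]))).foldl (pvUpd cap)
            (((pvPairs ((s.drop l).take (r - l))).map pvKey).foldl (pvUpd cap) o) =
            ((pvPairs ((s.drop l).take (r - l))).map pvKey).foldl (pvUpd cap) o := by
          apply pvFold_noncand
          intro k hk
          obtain ⟨y, hy, rfl⟩ := List.mem_map.mp hk
          obtain ⟨i, hi, hiy⟩ := List.mem_iff_getElem.mp hy
          rw [pvWin_getElem] at hiy
          have hilen : l + i < s.length := by simp at hi; omega
          have hly : s[l] ≤ y := by
            rw [← hiy]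
            rcases Nat.eq_zero_or_pos i with h0 | h0
            · subst h0; simp
            · exact hget l (l + i) hllen hilen (by omega)
          simp only [pvKey, pvCand, Bool.and_eq_false_iff, decide_eq_false_iff_not]
          right; omega
        rw [hnc]
        have hcastr : ((r : Int) - 1) = ((r - 1 : Nat) : Int) := by omega
        have hih := ih l (r - 1) o (by omega) (by omega) ho
        rw [show (r - 1) + 1 - l = r - l by omega] at hih
        rw [hcastr, ← hih]

-- ---- the linear rebuild scan returns A's first best pair ----

theorem pvFind_first (rest : List Int) (c : Int) (f : Int → Bool)
    (hf : ∀ y, f y = (y == c)) (hc : c ∈ rest) : rest.find? f = some c := by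
  induction rest with
  | nil => cases hc
  | cons y ys ih =>
    by_cases hy : y = c
    · rw [List.find?_cons_of_pos (by rw [hf, hy]; simp)]
      rw [hy]
    · rw [List.find?_cons_of_neg (by rw [hf]; simp [hy])]
      exact ih ((List.mem_cons.mp hc).resolve_left (fun h => hy h.symm))

theorem pvScan_eq (k : Int × Int) (m : List Int)
    (hex : ∃ p ∈ pvPairs m, pvKey p = k) :
    (match (pvPairs m).find? (fun p => pvKey p == k) with
     | some p => [p.1, p.2]
     | none => []) = pvScan m (k.1 - k.2) k.2 := by
  have hab : k.1 - k.2 ≤ k.2 := by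
    obtain ⟨p, hp, hkp⟩ := hex
    have h1 : p.1 + p.2 = k.1 := by rw [← hkp]; rfl
    have h2 : max p.1 p.2 = k.2 := by rw [← hkp]; rfl
    rcases max_cases p.1 p.2 with ⟨he, hle⟩ | ⟨he, hle⟩ <;> omega
  induction m with
  | nil => obtain ⟨p, hp, -⟩ := hex; cases hp
  | cons x rest ih =>
    simp only [pvPairs, List.find?_append, List.find?_map]
    by_cases hxa : x = k.1 - k.2
    · -- head is the smaller value of the best pair: the scan stops here with [a, b]
      have hbmem : k.2 ∈ rest := by
        obtain ⟨p, hp, hkp⟩ := hex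
        rcases List.mem_append.mp hp with hmap | hrest
        · obtain ⟨y, hy, rfl⟩ := List.mem_map.mp hmap
          have h1 : x + y = k.1 := by rw [← hkp]; rfl
          have : y = k.2 := by omega
          rwa [← this]
        · have h1 : p.1 + p.2 = k.1 := by rw [← hkp]; rfl
          have h2 : max p.1 p.2 = k.2 := by rw [← hkp]; rfl
          have hm := pvPairs_mem rest p hrest
          rcases max_choice p.1 p.2 with he | he <;> rw [← h2, he]
          · exact hm.1
          · exact hm.2
      have hf : ∀ y, ((fun p => pvKey p == k) ∘ (fun y => (x, y))) y = (y == k.2) := by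
        intro y
        simp only [Function.comp_apply]
        rw [Bool.eq_iff_iff]
        simp only [beq_iff_eq]
        constructor
        · intro h
          have h1 : x + y = k.1 := by rw [← h]; rfl
          omega
        · rintro rfl
          have : pvKey (x, k.2) = (x + k.2, max x k.2) := rfl
          rw [this, max_eq_right (by omega)]
          have : x + k.2 = k.1 := by omega
          rw [this]
      rw [pvFind_first rest k.2 _ hf hbmem]
      show [x, k.2] = pvScan (x :: rest) (k.1 - k.2) k.2
      rw [pvScan, if_pos hxa, hxa]
    · by_cases hxb : x = k.2
      · -- head is the larger value: the scan stops here with [b, a]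
        have hamem : k.1 - k.2 ∈ rest := by
          obtain ⟨p, hp, hkp⟩ := hex
          rcases List.mem_append.mp hp with hmap | hrest
          · obtain ⟨y, hy, rfl⟩ := List.mem_map.mp hmap
            have h1 : x + y = k.1 := by rw [← hkp]; rfl
            have : y = k.1 - k.2 := by omega
            rwa [← this]
          · have h1 : p.1 + p.2 = k.1 := by rw [← hkp]; rfl
            have h2 : max p.1 p.2 = k.2 := by rw [← hkp]; rfl
            have hm := pvPairs_mem rest p hrest
            rcases max_cases p.1 p.2 with ⟨he, hle⟩ | ⟨he, hle⟩
            · have : k.1 - k.2 = p.2 := by omega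
              rw [this]; exact hm.2
            · have : k.1 - k.2 = p.1 := by omega
              rw [this]; exact hm.1
        have hf : ∀ y, ((fun p => pvKey p == k) ∘ (fun y => (x, y))) y = (y == k.1 - k.2) := by
          intro y
          simp only [Function.comp_apply]
          rw [Bool.eq_iff_iff]
          simp only [beq_iff_eq]
          constructor
          · intro h
            have h1 : x + y = k.1 := by rw [← h]; rfl
            omega
          · rintro rfl
            have : pvKey (x, k.1 - k.2) = (x + (k.1 - k.2), max x (k.1 - k.2)) := rfl
            rw [this, max_eq_left (by omega)]
            have h1 : x + (k.1 - k.2) = k.1 := by omega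
            rw [h1, hxb]
        rw [pvFind_first rest (k.1 - k.2) _ hf hamem]
        show [x, k.1 - k.2] = pvScan (x :: rest) (k.1 - k.2) k.2
        rw [pvScan, if_neg hxa, if_pos hxb, hxb]
      · -- head belongs to no best pair: both sides skip it
        have hnone : (rest.find? ((fun p => pvKey p == k) ∘ (fun y => (x, y)))) = none := by
          rw [List.find?_eq_none]
          intro y hy hp
          have hkp : pvKey (x, y) = k := by simpa using hp
          have h1 : x + y = k.1 := by rw [← hkp]; rfl
          have h2 : max x y = k.2 := by rw [← hkp]; rfl
          rcases max_cases x y with ⟨he, hle⟩ | ⟨he, hle⟩ <;> omega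
        have hex' : ∃ p ∈ pvPairs rest, pvKey p = k := by
          obtain ⟨p, hp, hkp⟩ := hex
          rcases List.mem_append.mp hp with hmap | hrest
          · obtain ⟨y, hy, rfl⟩ := List.mem_map.mp hmap
            have h1 : x + y = k.1 := by rw [← hkp]; rfl
            have h2 : max x y = k.2 := by rw [← hkp]; rfl
            exfalso
            rcases max_cases x y with ⟨he, hle⟩ | ⟨he, hle⟩ <;> omega
          · exact ⟨p, hrest, hkp⟩
        rw [hnone, Option.map_none, Option.none_or]
        rw [ih hex']
        show _ = pvScan (x :: rest) (k.1 - k.2) k.2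
        rw [pvScan, if_neg hxa, if_neg hxb]

-- ---- assembly ----

theorem pvEq_main (m : List Int) (f : Int) :
    find_longest_movie m f = find_longest_movie_alt m f := by
  rw [pvA_eq_fold m f, pvFoldA_char (f - 30) (pvPairs m)]
  rcases hm : m with _ | ⟨x, rest⟩
  · rfl
  · rw [← hm]
    have hlen : 1 ≤ m.length := by rw [hm]; simp
    unfold find_longest_movie_alt
    dsimp only
    have hslen : (PySem.List.sorted m (fun y => y) false).length = m.length :=
      PySem.List.length_sorted m _ _
    have hs : (PySem.List.sorted m (fun y => y) false).Pairwise (· ≤ ·) := by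
      have := PySem.List.sorted_pairwise m (fun y => y)
      simpa using this
    have hperm := PySem.List.sorted_perm m (fun y => y) false
    have hTP := pvTPGo_eq (PySem.List.sorted m (fun y => y) false) (f - 30) hs
      (m.length - 1) 0 (m.length - 1) none (by omega) (by omega) (fun k h => by cases h)
    have hfuel : ((m.length : Int) - 1 - 0).toNat = m.length - 1 := by omega
    have hr : ((m.length : Int) - 1) = ((m.length - 1 : Nat) : Int) := by omega
    have hwin : ((PySem.List.sorted m (fun y => y) false).drop 0).take ((m.length - 1) + 1 - 0)
        = PySem.List.sorted m (fun y => y) false := by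
      rw [List.drop_zero, show (m.length - 1) + 1 - 0 = m.length by omega, ← hslen,
        List.take_length]
    rw [hwin] at hTP
    have hTP' : pvTPGo (PySem.List.sorted m (fun y => y) false) (f - 30) (m.length - 1) 0
        ((m.length - 1 : Nat) : Int) 0 0 =
        pvB (((pvPairs (PySem.List.sorted m (fun y => y) false)).map pvKey).foldl
          (pvUpd (f - 30)) none) := hTP
    rw [hfuel, hr, hTP']
    have hbk : ((pvPairs (PySem.List.sorted m (fun y => y) false)).map pvKey).foldl
        (pvUpd (f - 30)) none = ((pvPairs m).map pvKey).foldl (pvUpd (f - 30)) none :=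
      pvBk_perm (f - 30) hperm
    rw [hbk]
    rcases hbk2 : ((pvPairs m).map pvKey).foldl (pvUpd (f - 30)) none with _ | k
    · simp [pvB, pvAbs]
    · have hatt := pvFold_attain (f - 30) ((pvPairs m).map pvKey) none k hbk2
      rcases hatt with h' | ⟨hkmem, hkc⟩
      · cases h'
      have hkpos := (pvCand_key_pos _ _ hkc).1
      obtain ⟨p, hpmem, hkp⟩ := List.mem_map.mp hkmem
      dsimp only [pvB]
      rw [if_neg (by omega)]
      rw [← pvScan_eq k m ⟨p, hpmem, hkp⟩]
      rcases hfind : (pvPairs m).find? (fun p => pvKey p == k) with _ | q <;> rfl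

-- ===== VERDICT (by name: the statement is the Claim_ definition above) =====
theorem find_longest_movie_spec : Claim_equal_find_longest_movie := by
  unfold Claim_equal_find_longest_movie
  intro m f _ _
  unfold Spec_find_longest_movie
  exact pvEq_main m f
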